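-- pv_equiv track=rewrite | github.com/elvispy/MyFiles | Python/Project Euler/PE188.py | darrow
-- ===== SOURCE A (Python) =====
-- class pot10:
--     def __init__(self, two, five):
--         self.two = two
--         self.five = five
--
--     def phi(self):
--         if self.two > 0:
--             self.two = self.two - 1
--
--         if self.five > 0:
--             self.five = self.five - 1
--             self.two = self.two + 2
--
--     def __repr__(self):
--         return str(pow(2, self.two) * pow(5, self.five))
--
--     def tonumber(self):
--         return pow(2, self.two) * pow(5, self.five)
--
-- def darrow(a, k):
--     aux = pot10(8, 8)
--     auxs = []
--     while aux.tonumber() > 1 and len(auxs) < k: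
--         auxs.append(aux.tonumber())
--         aux.phi()
--
--     res = 1
--     for i in auxs[::-1]:
--         res = pow(a, res, i)
--
--     return res
-- ===== SOURCE B (Python) =====
-- def darrow(a, k):
--     # The moduli stay of the form 2^x * 5^y, so Euler's product needs only primes 2 and 5.
--     def tot(m):
--         r = m
--         if m % 2 == 0:
--             r -= r // 2
--         if m % 5 == 0:
--             r -= r // 5
--         return r
--
--     def go(m, depth):
--         if m <= 1 or depth <= 0:
--             return 1
--         return pow(a, go(tot(m), depth - 1), m)
--
--     return go(10 ** 8, k)
-- ===== Notes on version B (the rewrite author's own statement) =====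
-- stated objective: simpler
-- what changed: Replaces the pot10 exponent-pair class, the forward chain-building while loop and the separate reverse pow-fold by a single recursion go(m, depth) over the shrinking modulus, with a plain-integer Euler totient (product formula over primes 2 and 5) instead of the exponent-pair phi.
import Mathlib
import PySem

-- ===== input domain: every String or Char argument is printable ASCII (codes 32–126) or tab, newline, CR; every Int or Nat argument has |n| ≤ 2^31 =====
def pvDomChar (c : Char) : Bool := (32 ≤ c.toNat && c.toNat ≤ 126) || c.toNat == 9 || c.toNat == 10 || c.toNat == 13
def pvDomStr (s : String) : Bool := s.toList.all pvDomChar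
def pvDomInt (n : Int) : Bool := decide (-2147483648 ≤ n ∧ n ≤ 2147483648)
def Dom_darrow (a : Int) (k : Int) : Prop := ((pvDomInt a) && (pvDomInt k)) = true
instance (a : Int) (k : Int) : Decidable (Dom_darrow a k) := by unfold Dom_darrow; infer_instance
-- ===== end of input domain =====

-- B replaces A's pot10 exponent-pair class, forward chain loop and reverse pow-fold by one
-- recursion over the shrinking modulus with a plain-integer totient (objective: simpler).

-- ===== PORT A =====
-- pot10.tonumber: pow(2, two) * pow(5, five); both exponents stay ≥ 0 throughout A's run,
-- where Python pow agrees with ^ on .toNat.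
def pvTonumber (two five : Int) : Int := 2 ^ two.toNat * 5 ^ five.toNat

-- pot10.phi (mutates the pair in place; returned here as the new pair)
def pvPhi (two five : Int) : Int × Int :=
  let two := if two > 0 then two - 1 else two
  if five > 0 then (two + 2, five - 1) else (two, five)

-- the while loop: 'while aux.tonumber() > 1 and len(auxs) < k'; since every iteration
-- appends exactly one element, 'len(auxs) < k' is exactly fuel k.toNat.
def pvLoopA (two five : Int) (n : Nat) : List Int :=
  match n with
  | 0 => []
  | n + 1 =>
    if pvTonumber two five > 1 then
      pvTonumber two five :: pvLoopA (pvPhi two five).1 (pvPhi two five).2 n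
    else []

def darrow (a : Int) (k : Int) : Int :=
  let auxs := pvLoopA 8 8 k.toNat
  -- 'for i in auxs[::-1]: res = pow(a, res, i)'; res stays ≥ 1, so res.toNat is exact
  List.foldl (fun res i => PySem.Int.powMod a res.toNat i) 1 auxs.reverse

-- ===== PORT B =====
def pvTot (m : Int) : Int :=
  let r := m
  let r := if PySem.Int.mod m 2 = 0 then r - PySem.Int.floordiv r 2 else r
  if PySem.Int.mod m 5 = 0 then r - PySem.Int.floordiv r 5 else r

def pvGo (a : Int) (m : Int) (d : Int) : Int :=
  if m ≤ 1 ∨ d ≤ 0 then 1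
  else PySem.Int.powMod a (pvGo a (pvTot m) (d - 1)).toNat m
termination_by d.toNat
decreasing_by omega

def darrow_alt (a : Int) (k : Int) : Int := pvGo a (10 ^ 8) k

-- ===== PRECONDITION & SPEC =====
def Spec_darrow (a : Int) (k : Int) (out : Int) : Prop := out = darrow_alt a k
instance (a : Int) (k : Int) (out : Int) : Decidable (Spec_darrow a k out) := by unfold Spec_darrow; infer_instance

-- ===== CLAIM (what is proved, stated in full; the proofs are below) =====
def Claim_equal_darrow : Prop := ∀ (a : Int) (k : Int), Dom_darrow a k → Spec_darrow a k (darrow a k)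

-- ===== LEMMAS AND PROOFS =====

-- arithmetic helpers for tot_tonumber
lemma pv_mod_pow_eq_zero (p : Int) (_hp : 0 < p) (x : Nat) (r : Int) :
    PySem.Int.mod (p ^ (x + 1) * r) p = 0 := by
  rw [PySem.Int.mod_eq_zero_iff_dvd]
  exact ⟨p ^ x * r, by ring⟩

lemma pv_floordiv_pow (p : Int) (_hp : 0 < p) (x : Nat) (r : Int) :
    PySem.Int.floordiv (p ^ (x + 1) * r) p = p ^ x * r := by
  rw [PySem.Int.floordiv_eq_ediv_of_pos _hp,
      show p ^ (x + 1) * r = p * (p ^ x * r) by ring]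
  exact Int.mul_ediv_cancel_left _ (by omega)

lemma pv_mod_two_pow_five (y : Nat) : PySem.Int.mod ((5:Int) ^ y) 2 ≠ 0 := by
  rw [Ne, PySem.Int.mod_eq_zero_iff_dvd]
  intro hdvd
  have h1 : ((5:Int) ^ y) = ((5 ^ y : Nat) : Int) := by push_cast; ring
  have h2 : (5 ^ y) % 2 = 1 := by rw [Nat.pow_mod]; simp
  rw [h1] at hdvd
  omega

lemma pv_mod_five_pow_two (x : Nat) : PySem.Int.mod ((2:Int) ^ x) 5 ≠ 0 := by
  rw [Ne, PySem.Int.mod_eq_zero_iff_dvd]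
  intro hdvd
  have h1 : ((2:Int) ^ x) = ((2 ^ x : Nat) : Int) := by push_cast; ring
  have h2 : (2 ^ x) % 5 ≠ 0 := by
    induction x with
    | zero => simp
    | succ n ih => rw [pow_succ, Nat.mul_mod]; omega
  rw [h1] at hdvd
  omega

-- B's totient agrees with A's exponent-pair phi on every number 2^t * 5^f
lemma tot_tonumber (t f : Int) (ht : 0 ≤ t) (hf : 0 ≤ f) :
    pvTot (pvTonumber t f) = pvTonumber (pvPhi t f).1 (pvPhi t f).2 := by
  unfold pvTot pvTonumber pvPhi
  by_cases htp : t > 0 <;> by_cases hfp : f > 0 <;>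
    simp only [htp, hfp, if_pos, if_false]
  · -- t > 0, f > 0
    obtain ⟨x, hxe⟩ : ∃ x : Nat, t.toNat = x + 1 := ⟨t.toNat - 1, by omega⟩
    obtain ⟨y, hye⟩ : ∃ y : Nat, f.toNat = y + 1 := ⟨f.toNat - 1, by omega⟩
    rw [hxe, hye, show (t - 1 + 2).toNat = x + 2 from by omega,
        show (f - 1).toNat = y from by omega]
    have d5 : PySem.Int.mod ((2:Int) ^ (x + 1) * 5 ^ (y + 1)) 5 = 0 := by
      rw [show ((2:Int) ^ (x + 1) * 5 ^ (y + 1)) = 5 ^ (y + 1) * 2 ^ (x + 1) from by ring]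
      exact pv_mod_pow_eq_zero 5 (by norm_num) y _
    have d2 : PySem.Int.mod ((2:Int) ^ (x + 1) * 5 ^ (y + 1)) 2 = 0 :=
      pv_mod_pow_eq_zero 2 (by norm_num) x _
    have q2 : PySem.Int.floordiv ((2:Int) ^ (x + 1) * 5 ^ (y + 1)) 2 = 2 ^ x * 5 ^ (y + 1) :=
      pv_floordiv_pow 2 (by norm_num) x _
    have q5 : PySem.Int.floordiv ((2:Int) ^ (x + 1) * 5 ^ (y + 1)
        - 2 ^ x * 5 ^ (y + 1)) 5 = 5 ^ y * 2 ^ x := by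
      rw [show ((2:Int) ^ (x + 1) * 5 ^ (y + 1) - 2 ^ x * 5 ^ (y + 1))
            = 5 ^ (y + 1) * 2 ^ x from by ring]
      exact pv_floordiv_pow 5 (by norm_num) y _
    rw [if_pos d5, if_pos d2, q2, q5]
    ring
  · -- t > 0, f = 0
    obtain ⟨x, hxe⟩ : ∃ x : Nat, t.toNat = x + 1 := ⟨t.toNat - 1, by omega⟩
    rw [hxe, show f.toNat = 0 from by omega, show (t - 1).toNat = x from by omega]
    simp only [pow_zero, mul_one]
    have d2 : PySem.Int.mod ((2:Int) ^ (x + 1)) 2 = 0 := by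
      simpa using pv_mod_pow_eq_zero 2 (by norm_num) x 1
    have q2 : PySem.Int.floordiv ((2:Int) ^ (x + 1)) 2 = 2 ^ x := by
      simpa using pv_floordiv_pow 2 (by norm_num) x 1
    rw [if_neg (pv_mod_five_pow_two (x + 1)), if_pos d2, q2]
    ring
  · -- t = 0, f > 0
    obtain ⟨y, hye⟩ : ∃ y : Nat, f.toNat = y + 1 := ⟨f.toNat - 1, by omega⟩
    rw [hye, show t.toNat = 0 from by omega, show (t + 2).toNat = 2 from by omega,
        show (f - 1).toNat = y from by omega]
    simp only [pow_zero, one_mul]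
    have d5 : PySem.Int.mod ((5:Int) ^ (y + 1)) 5 = 0 := by
      simpa using pv_mod_pow_eq_zero 5 (by norm_num) y 1
    have q5 : PySem.Int.floordiv ((5:Int) ^ (y + 1)) 5 = 5 ^ y := by
      simpa using pv_floordiv_pow 5 (by norm_num) y 1
    rw [if_pos d5, if_neg (pv_mod_two_pow_five (y + 1)), q5]
    ring
  · -- t = 0, f = 0
    rw [show t.toNat = 0 from by omega, show f.toNat = 0 from by omega]
    decide

lemma pvGo_toNat (a m d : Int) : pvGo a m ((d.toNat : Int)) = pvGo a m d := by
  rcases (by omega : 0 ≤ d ∨ d < 0) with h | h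
  · rw [Int.toNat_of_nonneg h]
  · have h1 : ((d.toNat : Int)) ≤ 0 := by omega
    have h2 : d ≤ 0 := h.le
    rw [pvGo]
    simp only [h1, or_true, if_true]
    rw [pvGo]
    simp [h2]

lemma key (a : Int) : ∀ (n : Nat) (t f : Int), 0 ≤ t → 0 ≤ f →
    List.foldl (fun res i => PySem.Int.powMod a res.toNat i) 1 (pvLoopA t f n).reverse
      = pvGo a (pvTonumber t f) (n : Int) := by
  intro n
  induction n with
  | zero =>
    intro t f ht hf
    rw [pvGo]
    simp [pvLoopA]
  | succ n ih =>
    intro t f ht hf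
    have ht' : 0 ≤ (pvPhi t f).1 := by
      unfold pvPhi; by_cases h1 : t > 0 <;> by_cases h2 : f > 0 <;> simp [h1, h2] <;> omega
    have hf' : 0 ≤ (pvPhi t f).2 := by
      unfold pvPhi; by_cases h1 : t > 0 <;> by_cases h2 : f > 0 <;> simp [h1, h2] <;> omega
    by_cases h : pvTonumber t f > 1
    · rw [pvLoopA, if_pos h, List.reverse_cons, List.foldl_append]
      simp only [List.foldl_cons, List.foldl_nil]
      rw [ih _ _ ht' hf']
      conv_rhs => rw [pvGo]
      rw [if_neg (by push Not; constructor <;> omega)]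
      rw [tot_tonumber t f ht hf,
          show ((n + 1 : Nat) : Int) - 1 = (n : Int) from by push_cast; ring]
    · rw [pvLoopA, if_neg h]
      simp only [List.reverse_nil, List.foldl_nil]
      rw [pvGo, if_pos (Or.inl (by omega))]

-- ===== VERDICT (by name: the statement is the Claim_ definition above) =====
theorem darrow_spec : Claim_equal_darrow := by
  intro a k _
  have h := key a k.toNat 8 8 (by norm_num) (by norm_num)
  rw [pvGo_toNat] at h
  have h2 : pvTonumber 8 8 = 10 ^ 8 := by decide
  rw [h2] at h
  exact h
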